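-- pv_equiv track=rewrite | github.com/ahmola/ComputerScience | Algorithm/CodingTest/BruteForce/모의고사.py | solution
-- ===== SOURCE A (Python) =====
-- def solution(answers):
--     who = []
--
--     supo = [0, 0, 0]
--     one = [1, 2, 3, 4, 5]
--     two = [2, 1, 2, 3, 2, 4, 2, 5]
--     three = [3, 3, 1, 1, 2, 2, 4, 4, 5, 5]
--     for i in range(len(answers)):
--         if answers[i] == one[i % 5]:
--             supo[0] += 1
--         if answers[i] == two[i % 8]:
--             supo[1] += 1
--         if answers[i] == three[i % 10]:
--             supo[2] += 1
--
--     max_value = max(supo)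
--     for i in range(3):
--         if supo[i] == max_value:
--             who.append(i + 1)
--     return who
-- ===== SOURCE B (Python) =====
-- def solution(answers):
--     patterns = [[1, 2, 3, 4, 5],
--                 [2, 1, 2, 3, 2, 4, 2, 5],
--                 [3, 3, 1, 1, 2, 2, 4, 4, 5, 5]]
--
--     # Histogram of (position mod 40, answer); 40 = lcm of the pattern lengths,
--     # so the residue mod 40 determines every pattern's expected answer.
--     cnt = {}
--     for i, a in enumerate(answers):
--         key = (i % 40, a)
--         cnt[key] = cnt.get(key, 0) + 1
--
--     scores = [sum(cnt.get((r, p[r % len(p)]), 0) for r in range(40))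
--               for p in patterns]
--     m = max(scores)
--     return [k + 1 for k, s in enumerate(scores) if s == m]
-- ===== Notes on version B (the rewrite author's own statement) =====
-- stated objective: alternative
-- what changed: A's per-index matching loop is replaced by a histogram algorithm: one pass builds a dictionary counting (index mod 40, answer) pairs (40 = lcm of the pattern lengths), and each score is then read off as a sum of 40 dictionary lookups, with no per-element matching against patterns.
import Mathlib
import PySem

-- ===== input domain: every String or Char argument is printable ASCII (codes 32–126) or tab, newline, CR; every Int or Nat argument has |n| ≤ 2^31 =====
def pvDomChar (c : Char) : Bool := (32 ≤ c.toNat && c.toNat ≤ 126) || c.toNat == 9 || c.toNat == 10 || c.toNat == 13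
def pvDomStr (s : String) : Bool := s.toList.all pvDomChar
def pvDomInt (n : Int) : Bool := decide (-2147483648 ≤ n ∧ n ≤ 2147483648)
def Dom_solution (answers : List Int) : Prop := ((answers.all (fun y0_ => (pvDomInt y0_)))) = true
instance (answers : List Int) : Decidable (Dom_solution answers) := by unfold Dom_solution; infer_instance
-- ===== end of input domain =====

-- B replaces A's per-index pattern matching by a histogram of (index mod 40, answer) pairs
-- read back through 40 dictionary lookups per pattern (alternative algorithm, same cost);
-- return values proved equal.


-- ===== PORT A =====
-- A's fused loop: one pass over the indices, three if-branches updating the shared counters.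
def solutionLoopA : List Int → Nat → Int × Int × Int → Int × Int × Int
  | [], _, s => s
  | a :: rest, i, (s1, s2, s3) =>
      solutionLoopA rest (i + 1)
        (s1 + (if a = ([1, 2, 3, 4, 5] : List Int).getD (i % 5) 0 then 1 else 0),
         s2 + (if a = ([2, 1, 2, 3, 2, 4, 2, 5] : List Int).getD (i % 8) 0 then 1 else 0),
         s3 + (if a = ([3, 3, 1, 1, 2, 2, 4, 4, 5, 5] : List Int).getD (i % 10) 0 then 1 else 0))

def solution (answers : List Int) : List Int :=
  let supo := solutionLoopA answers 0 (0, 0, 0)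
  let maxValue := max supo.1 (max supo.2.1 supo.2.2)
  ((if supo.1 = maxValue then [(1 : Int)] else []) ++
   (if supo.2.1 = maxValue then [(2 : Int)] else []) ++
   (if supo.2.2 = maxValue then [(3 : Int)] else []))

-- ===== PORT B =====
-- B's histogram: count (i % 40, a) pairs in one pass over enumerate(answers).
def solutionCnt (answers : List Int) : PySem.Dict (Int × Int) Int :=
  (PySem.List.enumerate answers 0).foldl
    (fun d ia => d.modify (ia.1 % 40, ia.2) 0 (· + 1)) PySem.Dict.empty

-- sum(cnt.get((r, p[r % len(p)]), 0) for r in range(40))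
def solutionScoreB (cnt : PySem.Dict (Int × Int) Int) (p : List Int) : Int :=
  (PySem.List.pyRange 0 40 1).foldl
    (fun s r => s + cnt.getD (r, PySem.List.pyGetD p (r % (p.length : Int)) 0) 0) 0

def solution_alt (answers : List Int) : List Int :=
  let cnt := solutionCnt answers
  let scores := ([[1, 2, 3, 4, 5], [2, 1, 2, 3, 2, 4, 2, 5],
                  [3, 3, 1, 1, 2, 2, 4, 4, 5, 5]] : List (List Int)).map (solutionScoreB cnt)
  let m := match PySem.List.max? scores (fun v => v) with  -- max(scores); scores has 3 elements, none unreachable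
    | some v => v
    | none => 0
  ((PySem.List.enumerate scores 0).filter (fun ks => ks.2 == m)).map (fun ks => ks.1 + 1)

-- ===== PRECONDITION & SPEC =====
def Spec_solution (answers : List Int) (out : List Int) : Prop := out = solution_alt answers
instance (answers : List Int) (out : List Int) : Decidable (Spec_solution answers out) := by unfold Spec_solution; infer_instance

-- ===== CLAIM (what is proved, stated in full; the proofs are below) =====
def Claim_equal_solution : Prop := ∀ (answers : List Int), Dom_solution answers → Spec_solution answers (solution answers)

-- ===== LEMMAS AND PROOFS =====

-- proof helper: number of matches of the cyclic pattern p against ans, starting at index i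
def mcInt (p : List Int) : List Int → Int → Int
  | [], _ => 0
  | a :: rest, i =>
      (if a = PySem.List.pyGetD p (i % (p.length : Int)) 0 then 1 else 0) + mcInt p rest (i + 1)

theorem solutionLoopA_eq_mc (ans : List Int) :
    ∀ (i : Nat) (s1 s2 s3 : Int),
      solutionLoopA ans i (s1, s2, s3) =
        (s1 + mcInt [1, 2, 3, 4, 5] ans i,
         s2 + mcInt [2, 1, 2, 3, 2, 4, 2, 5] ans i,
         s3 + mcInt [3, 3, 1, 1, 2, 2, 4, 4, 5, 5] ans i) := by
  induction ans with
  | nil => intro i s1 s2 s3; simp [solutionLoopA, mcInt]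
  | cons a rest ih =>
      intro i s1 s2 s3
      have e5 : PySem.List.pyGetD ([1, 2, 3, 4, 5] : List Int) ((i : Int) % 5) 0
          = ([1, 2, 3, 4, 5] : List Int).getD (i % 5) 0 := by
        have : ((i : Int) % 5) = ((i % 5 : Nat) : Int) := by push_cast; rfl
        rw [this, PySem.List.pyGetD_natCast]
      have e8 : PySem.List.pyGetD ([2, 1, 2, 3, 2, 4, 2, 5] : List Int) ((i : Int) % 8) 0
          = ([2, 1, 2, 3, 2, 4, 2, 5] : List Int).getD (i % 8) 0 := by
        have : ((i : Int) % 8) = ((i % 8 : Nat) : Int) := by push_cast; rfl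
        rw [this, PySem.List.pyGetD_natCast]
      have e10 : PySem.List.pyGetD ([3, 3, 1, 1, 2, 2, 4, 4, 5, 5] : List Int) ((i : Int) % 10) 0
          = ([3, 3, 1, 1, 2, 2, 4, 4, 5, 5] : List Int).getD (i % 10) 0 := by
        have : ((i : Int) % 10) = ((i % 10 : Nat) : Int) := by push_cast; rfl
        rw [this, PySem.List.pyGetD_natCast]
      simp only [solutionLoopA, mcInt, ih,
        show (([1, 2, 3, 4, 5] : List Int).length : Int) = 5 from rfl,
        show (([2, 1, 2, 3, 2, 4, 2, 5] : List Int).length : Int) = 8 from rfl,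
        show (([3, 3, 1, 1, 2, 2, 4, 4, 5, 5] : List Int).length : Int) = 10 from rfl,
        e5, e8, e10]
      have hc : ((i + 1 : Nat) : Int) = (i : Int) + 1 := by push_cast; ring
      rw [hc]
      refine Prod.ext (by ring) (Prod.ext (by ring) (by ring))

-- countP of a predicate that can only hold at one point of a Nodup list
theorem countP_point (q : Int → Bool) (j : Int) :
    ∀ (R : List Int), R.Nodup → j ∈ R → (∀ r, q r = true → r = j) →
      R.countP q = if q j then 1 else 0 := by
  intro R
  induction R with
  | nil => simp
  | cons r R ih =>
      intro hnd hj h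
      rw [List.countP_cons]
      rcases List.mem_cons.1 hj with rfl | hjR
      · have hz : R.countP q = 0 := by
          rw [List.countP_eq_zero]
          intro x hx hqx
          exact (List.nodup_cons.1 hnd).1 (h x hqx ▸ hx)
        rw [hz]; split_ifs <;> simp_all
      · have hrq : q r = false := by
          by_contra hc
          have : r = j := h r (by simp_all)
          exact (List.nodup_cons.1 hnd).1 (this ▸ hjR)
        rw [ih (List.nodup_cons.1 hnd).2 hjR h, hrq]; simp

-- a 0/1 indicator sum is a countP
theorem sum_ite_int (p : Int → Prop) [DecidablePred p] (l : List Int) :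
    (l.map (fun r => if p r then (1 : Int) else 0)).sum = l.countP (fun r => decide (p r)) := by
  induction l with
  | nil => simp
  | cons x l ih => by_cases h : p x <;> simp [h, ih] <;> push_cast <;> ring

-- a fold keyed through a function is a fold over the mapped list
theorem foldl_modify_key (l : List (Int × Int)) (d : PySem.Dict (Int × Int) Int) :
    l.foldl (fun d ia => d.modify (ia.1 % 40, ia.2) 0 (· + 1)) d
      = (l.map (fun ia => (ia.1 % 40, ia.2))).foldl (fun d k => d.modify k 0 (· + 1)) d := by
  induction l generalizing d with
  | nil => rfl
  | cons x l ih => simp [ih]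

theorem solutionCnt_getD (ans : List Int) (k : Int × Int) :
    (solutionCnt ans).getD k 0 =
      ((PySem.List.enumerate ans 0).map (fun ia => (ia.1 % 40, ia.2))).count k := by
  unfold solutionCnt
  rw [foldl_modify_key, PySem.Dict.getD_foldl_modify_add_one]
  simp [PySem.Dict.getD_empty]

-- the core: summing the histogram over one full period recovers the match count
theorem sum_count_eq_mc (p : List Int) (hdvd : ((p.length : Int)) ∣ 40) :
    ∀ (ans : List Int) (s : Int), 0 ≤ s →
      ((PySem.List.pyRange 0 40 1).map
        (fun r => (((((PySem.List.enumerate ans s).map (fun ia => (ia.1 % 40, ia.2)))).count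
            (r, PySem.List.pyGetD p (r % (p.length : Int)) 0) : Nat) : Int))).sum
        = mcInt p ans s := by
  intro ans
  induction ans with
  | nil => intro s hs; simp [mcInt, PySem.List.enumerate]
  | cons a rest ih =>
      intro s hs
      rw [PySem.List.enumerate_cons]
      simp only [List.map_cons, mcInt]
      have key : ∀ r : Int,
          ((((s % 40, a) :: (PySem.List.enumerate rest (s + 1)).map (fun ia => (ia.1 % 40, ia.2))).count
              (r, PySem.List.pyGetD p (r % (p.length : Int)) 0) : Nat) : Int)
          = (((PySem.List.enumerate rest (s + 1)).map (fun ia => (ia.1 % 40, ia.2))).count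
              (r, PySem.List.pyGetD p (r % (p.length : Int)) 0) : Int)
            + (if (s % 40, a) = (r, PySem.List.pyGetD p (r % (p.length : Int)) 0) then 1 else 0) := by
        intro r
        simp only [List.count_cons, beq_iff_eq]
        push_cast
        split_ifs with h <;> ring
      conv_rhs => rw [add_comm]
      calc ((PySem.List.pyRange 0 40 1).map _).sum
          = ((PySem.List.pyRange 0 40 1).map
              (fun r => (((PySem.List.enumerate rest (s + 1)).map (fun ia => (ia.1 % 40, ia.2))).count
                  (r, PySem.List.pyGetD p (r % (p.length : Int)) 0) : Int)
                + (if (s % 40, a) = (r, PySem.List.pyGetD p (r % (p.length : Int)) 0) then 1 else 0))).sum := by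
            apply congrArg; apply List.map_congr_left; intro r _; exact key r
        _ = ((PySem.List.pyRange 0 40 1).map
              (fun r => (((PySem.List.enumerate rest (s + 1)).map (fun ia => (ia.1 % 40, ia.2))).count
                  (r, PySem.List.pyGetD p (r % (p.length : Int)) 0) : Int))).sum
            + ((PySem.List.pyRange 0 40 1).map
              (fun r => (if (s % 40, a) = (r, PySem.List.pyGetD p (r % (p.length : Int)) 0) then (1 : Int) else 0))).sum := by
            rw [← List.sum_map_add]
        _ = mcInt p rest (s + 1)
            + (if a = PySem.List.pyGetD p (s % (p.length : Int)) 0 then 1 else 0) := by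
            congr 1
            · exact ih (s + 1) (by omega)
            · rw [sum_ite_int (fun r => (s % 40, a) = (r, PySem.List.pyGetD p (r % (p.length : Int)) 0))]
              have hmem : s % 40 ∈ PySem.List.pyRange 0 40 1 := by
                rw [PySem.List.mem_pyRange_one]; omega
              have hcp := countP_point
                (fun r => decide ((s % 40, a) = (r, PySem.List.pyGetD p (r % (p.length : Int)) 0)))
                (s % 40) (PySem.List.pyRange 0 40 1) (PySem.List.nodup_pyRange_one 0 40) hmem
                (by intro r h; simp only [decide_eq_true_eq, Prod.mk.injEq] at h; exact h.1.symm)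
              rw [hcp]
              have hmm : (s % 40) % (p.length : Int) = s % (p.length : Int) :=
                Int.emod_emod_of_dvd s hdvd
              simp only [hmm, decide_eq_true_eq, Prod.mk.injEq, true_and]
              push_cast
              split_ifs with h <;> ring


theorem scoreB_eq_mc (ans : List Int) (p : List Int)
    (hdvd : ((p.length : Int)) ∣ 40) :
    solutionScoreB (solutionCnt ans) p = mcInt p ans 0 := by
  unfold solutionScoreB
  rw [PySem.List.foldl_add]
  have hmc := sum_count_eq_mc p hdvd ans 0 le_rfl
  simp only [solutionCnt_getD]
  rw [zero_add]
  exact hmc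

-- ===== VERDICT (by name: the statement is the Claim_ definition above) =====
theorem solution_spec : Claim_equal_solution := by
  intro answers _
  unfold Spec_solution solution solution_alt
  simp only [List.map_cons, List.map_nil]
  rw [scoreB_eq_mc answers [1,2,3,4,5] (by decide),
      scoreB_eq_mc answers [2,1,2,3,2,4,2,5] (by decide),
      scoreB_eq_mc answers [3,3,1,1,2,2,4,4,5,5] (by decide)]
  rw [solutionLoopA_eq_mc answers 0 0 0 0]
  simp only [Nat.cast_zero]
  set x := mcInt [1,2,3,4,5] answers 0 with hx
  set y := mcInt [2,1,2,3,2,4,2,5] answers 0 with hy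
  set z := mcInt [3,3,1,1,2,2,4,4,5,5] answers 0 with hz
  simp only [zero_add, PySem.List.max?_id_cons]
  have hfold : ([y, z] : List Int).foldl max x = max x (max y z) := by
    simp [List.foldl, max_assoc]
  rw [hfold]
  set M := max x (max y z) with hMdef
  have hx1 : x ≤ M := le_max_left _ _
  have hy1 : y ≤ M := le_trans (le_max_left _ _) (le_max_right _ _)
  have hz1 : z ≤ M := le_trans (le_max_right _ _) (le_max_right _ _)
  have hM : M = x ∨ M = y ∨ M = z := by
    rcases max_choice x (max y z) with h | h
    · exact Or.inl h
    · rcases max_choice y z with h2 | h2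
      · right; left; rw [hMdef, h, h2]
      · right; right; rw [hMdef, h, h2]
  clear_value M
  simp only [PySem.List.enumerate_cons, PySem.List.enumerate_nil, List.filter_cons,
    List.filter_nil, beq_iff_eq]
  by_cases h1 : x = M <;> by_cases h2 : y = M <;> by_cases h3 : z = M <;>
    simp [h1, h2, h3]
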